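-- pv_equiv track=rewrite | github.com/42sol-eu/noah123d | src/noah123d/visual/console.py | _get_table_title
-- ===== SOURCE A (Python) =====
-- def _get_table_title(sample_items: list, context: str = None) -> str:
--     """Determine appropriate table title based on context and data content."""
--     if context == 'model':
--         return "Model Objects"
--     elif context == 'objects':
--         return "3D Objects"
--     elif context == 'textures':
--         return "Texture Details"
--     elif context == 'metadata':
--         return "Metadata Details"
--     elif context and context != 'general':
--         return f"{context.title()} Details"
--
--     # Analyze keys to guess content type when no context
--     if not sample_items:
--         return "Content Details"
--
--     all_keys = set()
--     for item in sample_items: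
--         if isinstance(item, dict):
--             all_keys.update(item.keys())
--
--     if 'vertices' in all_keys and 'triangles' in all_keys:
--         return "3D Objects Details"
--     elif 'id' in all_keys:
--         return "Objects"
--     else:
--         return "Content Details"
-- ===== SOURCE B (Python) =====
-- def _has_key(sample_items, key):
--     return any(isinstance(item, dict) and key in item for item in sample_items)
--
--
-- def _get_table_title(sample_items: list, context: str = None) -> str:
--     """Determine appropriate table title based on context and data content."""
--     if context == 'model':
--         return "Model Objects"
--     elif context == 'objects':
--         return "3D Objects"
--     elif context == 'textures':
--         return "Texture Details"
--     elif context == 'metadata':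
--         return "Metadata Details"
--     elif context and context != 'general':
--         return f"{context.title()} Details"
--
--     if _has_key(sample_items, 'vertices') and _has_key(sample_items, 'triangles'):
--         return "3D Objects Details"
--     elif _has_key(sample_items, 'id'):
--         return "Objects"
--     else:
--         return "Content Details"
-- ===== Notes on version B (the rewrite author's own statement) =====
-- stated objective: simpler
-- what changed: Drops A's all_keys set-building pass over every item's keys (and its separate empty-list guard) in favour of a _has_key helper doing targeted any()-scans for each of the three probed keys.
import Mathlib
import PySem

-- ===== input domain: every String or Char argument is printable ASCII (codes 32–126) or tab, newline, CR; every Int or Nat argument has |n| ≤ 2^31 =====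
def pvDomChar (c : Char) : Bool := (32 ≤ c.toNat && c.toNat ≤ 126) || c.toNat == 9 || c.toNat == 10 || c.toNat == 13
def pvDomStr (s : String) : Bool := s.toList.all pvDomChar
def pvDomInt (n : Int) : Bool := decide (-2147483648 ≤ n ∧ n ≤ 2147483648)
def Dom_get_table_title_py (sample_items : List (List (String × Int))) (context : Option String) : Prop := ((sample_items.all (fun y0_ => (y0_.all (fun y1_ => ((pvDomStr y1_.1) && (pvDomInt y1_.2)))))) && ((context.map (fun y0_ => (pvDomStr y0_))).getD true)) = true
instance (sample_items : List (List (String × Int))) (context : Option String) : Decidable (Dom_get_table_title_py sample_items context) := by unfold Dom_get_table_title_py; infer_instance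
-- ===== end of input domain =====

-- B replaces A's "collect the union of all keys into a set, then test membership"
-- pass by direct any-scans for each of the three keys (objective: simpler; no speed claim).

-- Python str.title() for the printable-ASCII domain: a letter starting a run of
-- letters is uppercased, letters continuing a run are lowercased, others kept.
-- (Exact on the stated ASCII domain: there 'cased' = ASCII letter.)
def pvTitleGo : List Char → Bool → List Char
  | [], _ => []
  | c :: cs, prevAlpha =>
    (if c.isAlpha then (if prevAlpha then c.toLower else c.toUpper) else c) ::
      pvTitleGo cs c.isAlpha

def pvTitle (s : String) : String := String.mk (pvTitleGo s.toList false)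

-- ===== PORT A =====
-- the key-analysis fallthrough of A: build all_keys as a Python set, then test membership
def pvAnalyzeA (sample_items : List (List (String × Int))) : String :=
  if sample_items = [] then "Content Details"
  else
    let all_keys : PySem.Set String :=
      sample_items.foldl (fun s item => PySem.Set.update s (item.map Prod.fst)) PySem.Set.empty
    if PySem.Set.contains all_keys "vertices" && PySem.Set.contains all_keys "triangles" then
      "3D Objects Details"
    else if PySem.Set.contains all_keys "id" then "Objects"
    else "Content Details"

def get_table_title_py (sample_items : List (List (String × Int))) (context : Option String) : String :=
  if context = some "model" then "Model Objects"
  else if context = some "objects" then "3D Objects"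
  else if context = some "textures" then "Texture Details"
  else if context = some "metadata" then "Metadata Details"
  else
    match context with
    | some s =>
      if s ≠ "" && s ≠ "general" then pvTitle s ++ " Details"
      else pvAnalyzeA sample_items
    | none => pvAnalyzeA sample_items

-- ===== PORT B =====
-- _has_key(sample_items, key): any(key in item for item in sample_items)
def pvHasKey (sample_items : List (List (String × Int))) (key : String) : Bool :=
  sample_items.any (fun item => item.any (fun p => p.1 == key))

def get_table_title_py_alt (sample_items : List (List (String × Int))) (context : Option String) : String :=
  if context = some "model" then "Model Objects"
  else if context = some "objects" then "3D Objects"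
  else if context = some "textures" then "Texture Details"
  else if context = some "metadata" then "Metadata Details"
  else
    match context with
    | some s =>
      if s ≠ "" && s ≠ "general" then pvTitle s ++ " Details"
      else
        if pvHasKey sample_items "vertices" && pvHasKey sample_items "triangles" then
          "3D Objects Details"
        else if pvHasKey sample_items "id" then "Objects"
        else "Content Details"
    | none =>
      if pvHasKey sample_items "vertices" && pvHasKey sample_items "triangles" then
        "3D Objects Details"
      else if pvHasKey sample_items "id" then "Objects"
      else "Content Details"

-- ===== PRECONDITION & SPEC =====
def Spec_get_table_title_py (sample_items : List (List (String × Int))) (context : Option String) (out : String) : Prop := out = get_table_title_py_alt sample_items context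
instance (sample_items : List (List (String × Int))) (context : Option String) (out : String) : Decidable (Spec_get_table_title_py sample_items context out) := by unfold Spec_get_table_title_py; infer_instance

-- ===== CLAIM (what is proved, stated in full; the proofs are below) =====
def Claim_equal_get_table_title_py : Prop := ∀ (sample_items : List (List (String × Int))) (context : Option String), Dom_get_table_title_py sample_items context → Spec_get_table_title_py sample_items context (get_table_title_py sample_items context)

-- ===== LEMMAS AND PROOFS =====

-- membership in the accumulated key set = initial membership or some item has the key
theorem pv_mem_foldl_update (l : List (List (String × Int))) (s : PySem.Set String)
    (k : String) :
    (k ∈ l.foldl (fun s item => PySem.Set.update s (item.map Prod.fst)) s) ↔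
      k ∈ s ∨ ∃ item ∈ l, k ∈ item.map Prod.fst := by
  induction l generalizing s with
  | nil => simp
  | cons hd tl ih =>
    simp only [List.foldl_cons, ih, PySem.Set.mem_update, List.mem_cons]
    constructor
    · rintro (⟨h | h⟩ | ⟨i, hi, hk⟩)
      · exact Or.inl h
      · exact Or.inr ⟨hd, Or.inl rfl, h⟩
      · exact Or.inr ⟨i, Or.inr hi, hk⟩
    · rintro (h | ⟨i, (rfl | hi), hk⟩)
      · exact Or.inl (Or.inl h)
      · exact Or.inl (Or.inr hk)
      · exact Or.inr ⟨i, hi, hk⟩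

theorem pv_contains_eq_hasKey (l : List (List (String × Int))) (k : String) :
    PySem.Set.contains
      (l.foldl (fun s item => PySem.Set.update s (item.map Prod.fst)) PySem.Set.empty) k
      = pvHasKey l k := by
  by_cases h : pvHasKey l k = true
  · rw [h]
    rw [PySem.Set.contains_iff, pv_mem_foldl_update]
    simp only [pvHasKey, List.any_eq_true, beq_iff_eq] at h
    obtain ⟨item, hi, p, hp, hk⟩ := h
    exact Or.inr ⟨item, hi, List.mem_map.mpr ⟨p, hp, hk⟩⟩
  · rw [Bool.eq_false_iff.mpr h, ← Bool.not_eq_true, PySem.Set.contains_iff,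
      pv_mem_foldl_update]
    simp only [pvHasKey, List.any_eq_true, beq_iff_eq] at h
    push_neg at h
    rintro (hs | ⟨item, hi, hk⟩)
    · simp [PySem.Set.empty] at hs
    · obtain ⟨p, hp, hpk⟩ := List.mem_map.mp hk
      exact h item hi p hp hpk

theorem pv_analyze_eq (sample_items : List (List (String × Int))) :
    pvAnalyzeA sample_items =
      (if pvHasKey sample_items "vertices" && pvHasKey sample_items "triangles" then
        "3D Objects Details"
      else if pvHasKey sample_items "id" then "Objects"
      else "Content Details") := by
  unfold pvAnalyzeA
  split
  · rename_i h
    subst h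
    simp [pvHasKey]
  · simp only [pv_contains_eq_hasKey]

-- ===== VERDICT (by name: the statement is the Claim_ definition above) =====
theorem get_table_title_py_spec : Claim_equal_get_table_title_py := by
  intro sample_items context _
  show get_table_title_py sample_items context = get_table_title_py_alt sample_items context
  unfold get_table_title_py get_table_title_py_alt
  simp only [pv_analyze_eq]
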